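-- pv_equiv track=rewrite | github.com/jgunn25/pythonProject3 | cases.py | cases_by_location
-- ===== SOURCE A (Python) =====
-- def cases_by_location(dictionary): # cases by location uses a for statement to extract information from the dictionary then proceeds with if statements
--     london_location = 0
--     middlesex_county_location = 0
--     unknown_location = 0
--     for key, value in dictionary.items():
--         for i in value:
--             if i[2] == "City of London":
--                 london_location = london_location + 1
--             elif i[2] == "Middlesex County":
--                 middlesex_county_location = middlesex_county_location + 1
--             else:
--                 unknown_location = unknown_location + 1
--     return london_location, middlesex_county_location, unknown_location
-- ===== SOURCE B (Python) =====
-- def cases_by_location(dictionary):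
--     labels = [i[2] for v in dictionary.values() for i in v]
--     london = labels.count("City of London")
--     middlesex = labels.count("Middlesex County")
--     return london, middlesex, len(labels) - london - middlesex
-- ===== Notes on version B (the rewrite author's own statement) =====
-- stated objective: idiomatic
-- what changed: Replaces the nested loop with three if/elif/else branch counters by a one-pass flatten into a label list, two list.count lookups and a subtraction from the total for the unknown bucket.
import Mathlib
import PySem

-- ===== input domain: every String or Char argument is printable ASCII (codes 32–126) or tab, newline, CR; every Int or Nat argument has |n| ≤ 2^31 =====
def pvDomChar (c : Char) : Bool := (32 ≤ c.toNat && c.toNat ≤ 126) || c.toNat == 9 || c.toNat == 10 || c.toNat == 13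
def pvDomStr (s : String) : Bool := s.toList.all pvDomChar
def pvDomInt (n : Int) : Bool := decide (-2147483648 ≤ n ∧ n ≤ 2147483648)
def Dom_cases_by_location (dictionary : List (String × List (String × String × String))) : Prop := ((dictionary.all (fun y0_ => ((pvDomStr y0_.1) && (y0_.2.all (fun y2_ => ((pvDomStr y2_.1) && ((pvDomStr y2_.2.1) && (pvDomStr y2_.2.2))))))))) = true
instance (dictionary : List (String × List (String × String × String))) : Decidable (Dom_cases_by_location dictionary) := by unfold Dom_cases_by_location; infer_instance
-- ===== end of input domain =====

-- B flattens labels and counts by label instead of branching counters (idiomatic rewrite, same cost).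


-- ===== PORT A =====
-- A: nested for-loops with three running counters, if/elif/else on the label
def cases_by_location (dictionary : List (String × List (String × String × String))) : Int × Int × Int :=
  dictionary.foldl
    (fun acc kv =>
      kv.2.foldl
        (fun (acc : Int × Int × Int) i =>
          if i.2.2 == "City of London" then (acc.1 + 1, acc.2.1, acc.2.2)
          else if i.2.2 == "Middlesex County" then (acc.1, acc.2.1 + 1, acc.2.2)
          else (acc.1, acc.2.1, acc.2.2 + 1))
        acc)
    (0, 0, 0)

-- ===== PORT B =====
-- B: flatten the labels once, count the two named labels, derive unknown by subtraction
def cases_by_location_alt (dictionary : List (String × List (String × String × String))) : Int × Int × Int :=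
  let labels := dictionary.flatMap (fun kv => kv.2.map (fun i => i.2.2))
  let london : Int := labels.count "City of London"
  let middlesex : Int := labels.count "Middlesex County"
  (london, middlesex, (labels.length : Int) - london - middlesex)

-- ===== PRECONDITION & SPEC =====
def Spec_cases_by_location (dictionary : List (String × List (String × String × String))) (out : Int × Int × Int) : Prop := out = cases_by_location_alt dictionary
instance (dictionary : List (String × List (String × String × String))) (out : Int × Int × Int) : Decidable (Spec_cases_by_location dictionary out) := by unfold Spec_cases_by_location; infer_instance

-- ===== CLAIM (what is proved, stated in full; the proofs are below) =====
def Claim_equal_cases_by_location : Prop := ∀ (dictionary : List (String × List (String × String × String))), Dom_cases_by_location dictionary → Spec_cases_by_location dictionary (cases_by_location dictionary)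

-- ===== LEMMAS AND PROOFS =====

-- A's inner step, viewed as a function of the label alone
def pvStep (acc : Int × Int × Int) (lab : String) : Int × Int × Int :=
  if lab == "City of London" then (acc.1 + 1, acc.2.1, acc.2.2)
  else if lab == "Middlesex County" then (acc.1, acc.2.1 + 1, acc.2.2)
  else (acc.1, acc.2.1, acc.2.2 + 1)

theorem pvA_eq_foldl_labels (dictionary : List (String × List (String × String × String))) (acc : Int × Int × Int) :
    dictionary.foldl
      (fun acc kv =>
        kv.2.foldl
          (fun (acc : Int × Int × Int) i =>
            if i.2.2 == "City of London" then (acc.1 + 1, acc.2.1, acc.2.2)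
            else if i.2.2 == "Middlesex County" then (acc.1, acc.2.1 + 1, acc.2.2)
            else (acc.1, acc.2.1, acc.2.2 + 1))
          acc)
      acc
    = (dictionary.flatMap (fun kv => kv.2.map (fun i => i.2.2))).foldl pvStep acc := by
  induction dictionary generalizing acc with
  | nil => rfl
  | cons kv t ih =>
    simp only [List.foldl_cons, List.flatMap_cons, List.foldl_append, ih, List.foldl_map]
    rfl

theorem pvFoldl_step_count (ls : List String) (a b c : Int) :
    ls.foldl pvStep (a, b, c)
    = (a + ls.count "City of London", b + ls.count "Middlesex County",
       c + ((ls.length : Int) - ls.count "City of London" - ls.count "Middlesex County")) := by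
  induction ls generalizing a b c with
  | nil => simp
  | cons h t ih =>
    simp only [List.foldl_cons, pvStep, List.count_cons, List.length_cons]
    by_cases h1 : h = "City of London"
    · subst h1
      simp only [beq_self_eq_true, if_true, ih]
      have : ("City of London" == "Middlesex County") = false := by decide
      simp [this]
      omega
    · by_cases h2 : h = "Middlesex County"
      · subst h2
        have : ("Middlesex County" == "City of London") = false := by decide
        simp only [this, beq_self_eq_true, if_true, ih]
        simp
        omega
      · have e1 : (h == "City of London") = false := by simp [h1]
        have e2 : (h == "Middlesex County") = false := by simp [h2]
        simp only [e1, e2, ih]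
        simp
        omega

-- ===== VERDICT (by name: the statement is the Claim_ definition above) =====
theorem cases_by_location_spec : Claim_equal_cases_by_location := by
  intro dictionary _
  unfold Spec_cases_by_location cases_by_location cases_by_location_alt
  rw [pvA_eq_foldl_labels, pvFoldl_step_count]
  simp
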